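-- pv_equiv track=rewrite | github.com/TITANMODE/ide | ide.py | table_concat
-- ===== SOURCE A (Python) =====
-- def table_concat(t, sep="", i=1, j=None):
--     if not isinstance(t, dict):
--         raise Exception("table.concat expects a table")
--     if j is None:
--         j = table_maxn(t)
--     result = ""
--     for index in range(i, j + 1):
--         if index in t:
--             result += str(t[index])
--             if index < j:
--                 result += sep
--     return result
--
-- def table_maxn(t):
--     if not isinstance(t, dict):
--         raise Exception("table.maxn expects a table")
--     max_key = 0
--     for key in t:
--         if isinstance(key, int) or (isinstance(key, float) and key.is_integer()):
--             k = int(key)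
--             if k > max_key:
--                 max_key = k
--     return max_key
-- ===== SOURCE B (Python) =====
-- def table_concat(t, sep="", i=1, j=None):
--     if not isinstance(t, dict):
--         raise Exception("table.concat expects a table")
--     # gather the integer-valued keys once, sorted ascending
--     ikeys = sorted({int(k) for k in t
--                     if isinstance(k, int) or (isinstance(k, float) and k.is_integer())})
--     if j is None:
--         j = max(ikeys[-1], 0) if ikeys else 0
--     parts = []
--     for k in ikeys:
--         if i <= k <= j:
--             parts.append(str(t[k]))
--             if k < j:
--                 parts.append(sep)
--     return "".join(parts)
-- ===== Notes on version B (the rewrite author's own statement) =====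
-- stated objective: alternative
-- what changed: B replaces A's dense scan over every integer in range(i, j+1) with membership tests by one pass over the sorted set of keys actually present in the table (also reading the default j off the last element of that sorted list), joining the collected pieces at the end; it trades the range scan for a sort of the present keys.
import Mathlib
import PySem

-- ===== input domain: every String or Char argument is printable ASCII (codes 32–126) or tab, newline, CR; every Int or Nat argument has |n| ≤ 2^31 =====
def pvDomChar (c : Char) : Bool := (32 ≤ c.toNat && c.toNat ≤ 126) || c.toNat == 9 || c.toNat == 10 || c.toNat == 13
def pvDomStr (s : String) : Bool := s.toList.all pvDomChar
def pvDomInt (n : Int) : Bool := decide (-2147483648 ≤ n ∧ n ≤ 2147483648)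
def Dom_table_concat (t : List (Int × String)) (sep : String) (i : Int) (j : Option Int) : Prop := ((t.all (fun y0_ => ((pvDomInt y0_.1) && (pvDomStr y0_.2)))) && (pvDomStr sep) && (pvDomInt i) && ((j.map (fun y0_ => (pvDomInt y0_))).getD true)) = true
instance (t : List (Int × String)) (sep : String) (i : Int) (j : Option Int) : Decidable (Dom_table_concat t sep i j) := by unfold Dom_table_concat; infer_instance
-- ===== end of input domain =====

-- B gathers the present keys in [i, j] once (sorted) instead of scanning every integer of the
-- dense range i..j and testing membership; same return value by a different traversal.

-- ===== PORT A =====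
-- str(t[index]) is guarded by 'index in t', so Dict.getD with a dummy default is exact here.
def table_concat (t : List (Int × String)) (sep : String) (i : Int) (j : Option Int) : String :=
  let d := PySem.Dict.ofList t
  let jv : Int := match j with
    | none =>
        -- inlined table_maxn: every key of the Lean table is an Int, so the isinstance test holds
        (PySem.Dict.keys d).foldl (fun max_key key => if key > max_key then key else max_key) 0
    | some v => v
  (PySem.List.pyRange i (jv + 1) 1).foldl
    (fun result index =>
      if PySem.Dict.contains d index then
        let result := result ++ PySem.Dict.getD d index ""
        if index < jv then result ++ sep else result
      else result) ""

-- ===== PORT B =====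
def table_concat_alt (t : List (Int × String)) (sep : String) (i : Int) (j : Option Int) : String :=
  let d := PySem.Dict.ofList t
  let ikeys := PySem.List.sorted (PySem.Set.ofList (PySem.Dict.keys d)) (fun k => k) false
  let jv : Int := match j with
    | none => match ikeys.getLast? with
              | some m => max m 0
              | none => 0
    | some v => v
  let parts := ikeys.foldl
    (fun parts k =>
      if i ≤ k ∧ k ≤ jv then
        let parts := parts ++ [PySem.Dict.getD d k ""]
        if k < jv then parts ++ [sep] else parts
      else parts) ([] : List String)
  PySem.Str.join "" parts

-- ===== PRECONDITION & SPEC =====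
def Spec_table_concat (t : List (Int × String)) (sep : String) (i : Int) (j : Option Int) (out : String) : Prop := out = table_concat_alt t sep i j
instance (t : List (Int × String)) (sep : String) (i : Int) (j : Option Int) (out : String) : Decidable (Spec_table_concat t sep i j out) := by unfold Spec_table_concat; infer_instance

-- ===== CLAIM (what is proved, stated in full; the proofs are below) =====
def Claim_equal_table_concat : Prop := ∀ (t : List (Int × String)) (sep : String) (i : Int) (j : Option Int), Dom_table_concat t sep i j → Spec_table_concat t sep i j (table_concat t sep i j)

-- ===== LEMMAS AND PROOFS =====

-- "".join of a snoc
theorem pvFlatten_intersperse_nil (l : List (List Char)) :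
    (List.intersperse ([] : List Char) l).flatten = l.flatten := by
  induction l with
  | nil => rfl
  | cons a t ih =>
    cases t with
    | nil => rfl
    | cons b u =>
      rw [List.intersperse_cons₂, List.flatten_cons, List.flatten_cons, ih]
      simp

theorem pvJoin_toList (parts : List String) :
    (PySem.Str.join "" parts).toList = (parts.map String.toList).flatten := by
  simp [PySem.Str.toList_join, PySem.Chars.join, List.intercalate, pvFlatten_intersperse_nil]

-- the two filtered index lists are equal: both strictly increasing with the same members
theorem pvLists_eq (ks : List Int) (i jv : Int) :
    (PySem.List.pyRange i (jv + 1) 1).filter (fun k => decide (k ∈ ks)) =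
      (PySem.List.sorted (PySem.Set.ofList ks) (fun k => k) false).filter
        (fun k => decide (i ≤ k ∧ k ≤ jv)) := by
  apply List.Perm.eq_of_pairwise (le := (· < ·))
      (fun a b _ _ h1 h2 => absurd h1 (asymm h2))
  · exact (PySem.List.pairwise_lt_pyRange_one i (jv+1)).filter _
  · exact (PySem.List.sorted_ofList_pairwise_lt ks).filter _
  · apply (List.perm_ext_iff_of_nodup ?_ ?_).2
    · intro a
      by_cases hm : a ∈ ks <;>
        simp only [List.mem_filter, PySem.List.mem_pyRange_one, PySem.List.mem_sorted,
          PySem.Set.mem_ofList, hm, decide_true, decide_false, decide_eq_true_eq,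
          true_and, and_true]
      · omega
      · simp
    · exact ((PySem.List.pairwise_lt_pyRange_one i (jv+1)).filter _).nodup
    · exact ((PySem.List.sorted_ofList_pairwise_lt ks).filter _).nodup

-- fold the same index list into a String (A) and into a ["…"]-list joined at the end (B)
theorem pvBridge (d : PySem.Dict Int String) (sep : String) (jv : Int) :
    ∀ (L : List Int) (res : String) (parts : List String),
      res.toList = (parts.map String.toList).flatten →
      (L.foldl (fun result index =>
          let result := result ++ PySem.Dict.getD d index ""
          if index < jv then result ++ sep else result) res).toList =
      ((L.foldl (fun parts k =>
          let parts := parts ++ [PySem.Dict.getD d k ""]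
          if k < jv then parts ++ [sep] else parts) parts).map String.toList).flatten := by
  intro L
  induction L with
  | nil => intro res parts h; simpa using h
  | cons k L ih =>
    intro res parts h
    simp only [List.foldl_cons]
    by_cases hk : k < jv <;>
      · simp only [hk, if_pos, ite_false]
        apply ih
        simp [String.toList_append, h]

-- running max over the keys = max of the last element of the sorted key set (clamped at 0)
theorem pvMaxn_eq (ks : List Int) :
    ks.foldl (fun max_key key => if key > max_key then key else max_key) 0 =
      (match (PySem.List.sorted (PySem.Set.ofList ks) (fun k => k) false).getLast? with
        | some m => max m 0
        | none => 0) := by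
  have hfold : ks.foldl (fun max_key key => if key > max_key then key else max_key) 0 =
      ks.foldl max 0 := by
    apply PySem.List.foldl_congr_mem
    intro acc x _
    by_cases h : acc < x <;> simp [h, max_def] <;> omega
  rw [hfold]
  set K := PySem.List.sorted (PySem.Set.ofList ks) (fun k => k) false with hK
  rcases hlast : K.getLast? with _ | m
  · -- K empty → ks empty
    have hKnil : K = [] := List.getLast?_eq_none_iff.mp hlast
    have hks : ks = [] := by
      by_contra hne
      rcases List.exists_mem_of_ne_nil ks hne with ⟨x, hx⟩
      have hxK : x ∈ K := by
        rw [hK, PySem.List.mem_sorted, PySem.Set.mem_ofList]; exact hx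
      rw [hKnil] at hxK; simp at hxK
    simp [hks]
  · have hmK : m ∈ K := List.mem_of_getLast? hlast
    have hmks : m ∈ ks := by
      rw [hK, PySem.List.mem_sorted, PySem.Set.mem_ofList] at hmK; exact hmK
    have hub : ∀ y ∈ ks, y ≤ m := by
      have hsorted : K.Pairwise (· ≤ ·) := by
        have := PySem.List.sorted_ofList_pairwise_lt ks
        exact (hK ▸ this).imp le_of_lt
      have hrev : K.reverse.Pairwise (fun a b => b ≤ a) := by
        rw [List.pairwise_reverse]; exact hsorted
      have hhead : K.reverse.head? = some m := by
        rw [List.head?_reverse]; exact hlast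
      intro y hy
      have hyK : y ∈ K.reverse := by
        rw [List.mem_reverse, hK, PySem.List.mem_sorted, PySem.Set.mem_ofList]; exact hy
      rcases hKr : K.reverse with _ | ⟨a, rest⟩
      · rw [hKr] at hyK; simp at hyK
      · rw [hKr] at hhead hyK hrev
        simp only [List.head?_cons, Option.some.injEq] at hhead
        subst hhead
        rcases List.mem_cons.mp hyK with h | h
        · omega
        · exact (List.pairwise_cons.mp hrev).1 y h
    have h1 := PySem.List.le_foldl_max ks 0
    have h2 := PySem.List.foldl_max_mem ks 0
    have hFm : ks.foldl max 0 ≤ max m 0 := by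
      rcases h2 with h | h
      · omega
      · have := hub _ h; omega
    have hmF : max m 0 ≤ ks.foldl max 0 := by
      have hA := h1.2 m hmks
      have hB := h1.1
      omega
    show List.foldl max 0 ks = max m 0
    omega

theorem pvMain (t : List (Int × String)) (sep : String) (i jv : Int) :
    (PySem.List.pyRange i (jv + 1) 1).foldl
      (fun result index =>
        if PySem.Dict.contains (PySem.Dict.ofList t) index then
          let result := result ++ PySem.Dict.getD (PySem.Dict.ofList t) index ""
          if index < jv then result ++ sep else result
        else result) "" =
    PySem.Str.join ""
      ((PySem.List.sorted (PySem.Set.ofList (PySem.Dict.keys (PySem.Dict.ofList t))) (fun k => k) false).foldl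
        (fun parts k =>
          if i ≤ k ∧ k ≤ jv then
            let parts := parts ++ [PySem.Dict.getD (PySem.Dict.ofList t) k ""]
            if k < jv then parts ++ [sep] else parts
          else parts) ([] : List String)) := by
  set d := PySem.Dict.ofList t with hd
  apply String.toList_inj.mp
  rw [PySem.List.foldl_if_eq_foldl_filter, PySem.List.foldl_ite_eq_foldl_filter,
    pvJoin_toList]
  have hcontains : ((PySem.List.pyRange i (jv + 1) 1).filter (fun k => PySem.Dict.contains d k)) =
      ((PySem.List.pyRange i (jv + 1) 1).filter (fun k => decide (k ∈ PySem.Dict.keys d))) := by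
    apply List.filter_congr
    intro x _
    cases h : PySem.Dict.contains d x with
    | false =>
        have hx : x ∉ PySem.Dict.keys d := fun hx => by
          rw [(PySem.Dict.contains_iff_mem_keys d x).mpr hx] at h; exact Bool.true_eq_false.mp h
        simp [hx]
    | true => simp [(PySem.Dict.contains_iff_mem_keys d x).mp h]
  rw [hcontains, pvLists_eq (PySem.Dict.keys d) i jv]
  exact pvBridge d sep jv _ "" [] (by simp)

-- ===== VERDICT (by name: the statement is the Claim_ definition above) =====
theorem table_concat_spec : Claim_equal_table_concat := by
  intro t sep i j _
  unfold Spec_table_concat table_concat table_concat_alt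
  cases j with
  | some v => exact pvMain t sep i v
  | none =>
    simp only []
    rw [pvMaxn_eq]
    exact pvMain t sep i _
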